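-- pv_equiv track=rewrite | github.com/rezahh107/student-mentor-allocation-system | src/sma/ui/trace_index.py | _to_windows
-- ===== SOURCE A (Python) =====
-- from typing import (
--     TYPE_CHECKING,
--     Dict,
--     Iterable,
--     Iterator,
--     List,
--     Mapping,
--     MutableMapping,
--     Protocol,
--     Set,
--     Tuple,
-- )
--
-- def _to_windows(indices: Iterable[int]) -> List[Tuple[int, int]]:
--     windows: List[Tuple[int, int]] = []
--     iterator = iter(indices)
--     try:
--         start = prev = next(iterator)
--     except StopIteration:
--         return windows
--     for index in iterator:
--         if index == prev + 1:
--             prev = index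
--             continue
--         windows.append((start, prev + 1))
--         start = prev = index
--     windows.append((start, prev + 1))
--     return windows
-- ===== SOURCE B (Python) =====
-- from itertools import groupby
--
--
-- def _to_windows(indices):
--     windows = []
--     for _, group in groupby(enumerate(indices), key=lambda p: p[1] - p[0]):
--         items = list(group)
--         windows.append((items[0][1], items[-1][1] + 1))
--     return windows
-- ===== Notes on version B (the rewrite author's own statement) =====
-- stated objective: idiomatic
-- what changed: Replaces the explicit start/prev state machine with itertools.groupby over enumerate(indices) keyed by value-minus-position, so each maximal consecutive run becomes one group mapped to (first, last+1).
import Mathlib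
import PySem

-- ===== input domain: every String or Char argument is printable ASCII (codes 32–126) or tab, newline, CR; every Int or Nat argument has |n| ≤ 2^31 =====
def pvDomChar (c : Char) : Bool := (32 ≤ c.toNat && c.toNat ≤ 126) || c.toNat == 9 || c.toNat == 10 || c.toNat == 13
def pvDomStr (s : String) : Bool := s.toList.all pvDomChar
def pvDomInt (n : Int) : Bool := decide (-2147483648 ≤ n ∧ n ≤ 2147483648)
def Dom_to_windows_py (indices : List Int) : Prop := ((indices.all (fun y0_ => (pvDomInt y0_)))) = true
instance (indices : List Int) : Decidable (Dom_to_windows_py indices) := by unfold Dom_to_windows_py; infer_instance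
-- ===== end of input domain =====

-- B replaces A's explicit start/prev state machine by grouping enumerate(indices) on the
-- key value-minus-position (itertools.groupby style); same O(n) cost, more idiomatic.

-- ===== PORT A =====
-- A's for-loop over the rest of the iterator, carrying (start, prev); the trailing
-- `windows.append((start, prev + 1))` is the base case.
def toWindowsLoop (start prev : Int) : List Int → List (Int × Int)
  | [] => [(start, prev + 1)]
  | index :: rest =>
    if index = prev + 1 then toWindowsLoop start index rest
    else (start, prev + 1) :: toWindowsLoop index index rest

def to_windows_py (indices : List Int) : List (Int × Int) :=
  match indices with
  | [] => []                                     -- StopIteration on first next()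
  | x :: rest => toWindowsLoop x x rest

-- ===== PORT B =====
-- enumerate(indices) (pairs (position, value))
def enumFromB (n : Int) : List Int → List (Int × Int)
  | [] => []
  | x :: xs => (n, x) :: enumFromB (n + 1) xs

-- itertools.groupby with key p[1] - p[0]: maximal adjacent blocks of equal key
def splitRunsB : List (Int × Int) → List (List (Int × Int))
  | [] => []
  | p :: rest =>
    match splitRunsB rest with
    | [] => [[p]]
    | [] :: gs => [p] :: [] :: gs                -- unreachable: groups are never empty
    | (q :: g) :: gs =>
      if p.2 - p.1 = q.2 - q.1 then (p :: q :: g) :: gs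
      else [p] :: (q :: g) :: gs

-- one group → (items[0][1], items[-1][1] + 1)
def groupWinB : List (Int × Int) → List (Int × Int)
  | [] => []                                     -- unreachable: groups are never empty
  | q :: qs => [(q.2, (List.getLastD qs q).2 + 1)]

def to_windows_py_alt (indices : List Int) : List (Int × Int) :=
  (splitRunsB (enumFromB 0 indices)).flatMap groupWinB

-- ===== PRECONDITION & SPEC =====
def Spec_to_windows_py (indices : List Int) (out : List (Int × Int)) : Prop := out = to_windows_py_alt indices
instance (indices : List Int) (out : List (Int × Int)) : Decidable (Spec_to_windows_py indices out) := by unfold Spec_to_windows_py; infer_instance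

-- ===== CLAIM (what is proved, stated in full; the proofs are below) =====
def Claim_equal_to_windows_py : Prop := ∀ (indices : List Int), Dom_to_windows_py indices → Spec_to_windows_py indices (to_windows_py indices)

-- ===== LEMMAS AND PROOFS =====

theorem splitRunsB_cons (p : Int × Int) (rest : List (Int × Int)) :
    splitRunsB (p :: rest) =
      match splitRunsB rest with
      | [] => [[p]]
      | [] :: gs => [p] :: [] :: gs
      | (q :: g) :: gs =>
        if p.2 - p.1 = q.2 - q.1 then (p :: q :: g) :: gs
        else [p] :: (q :: g) :: gs := rfl

-- replace the first window's start (private to the proof)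
def patchStart (s : Int) : List (Int × Int) → List (Int × Int)
  | [] => []
  | w :: ws => (s, w.2) :: ws

theorem splitRunsB_enumFromB_cons :
    ∀ (rest : List Int) (n x : Int),
      ∃ g gs, splitRunsB (enumFromB n (x :: rest)) = ((n, x) :: g) :: gs := by
  intro rest
  induction rest with
  | nil => intro n x; exact ⟨[], [], rfl⟩
  | cons y rs ih =>
    intro n x
    obtain ⟨g, gs, h⟩ := ih (n + 1) y
    by_cases hk : x - n = y - (n + 1)
    · refine ⟨(n + 1, y) :: g, gs, ?_⟩
      rw [show enumFromB n (x :: y :: rs) = (n, x) :: enumFromB (n + 1) (y :: rs) from rfl,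
        splitRunsB_cons, h]
      simp [hk]
    · refine ⟨[], ((n + 1, y) :: g) :: gs, ?_⟩
      rw [show enumFromB n (x :: y :: rs) = (n, x) :: enumFromB (n + 1) (y :: rs) from rfl,
        splitRunsB_cons, h]
      simp [hk]

theorem patch_loop :
    ∀ (rest : List Int) (n s p : Int),
      patchStart s ((splitRunsB (enumFromB n (p :: rest))).flatMap groupWinB)
        = toWindowsLoop s p rest := by
  intro rest
  induction rest with
  | nil =>
    intro n s p
    simp [enumFromB, splitRunsB, groupWinB, toWindowsLoop, patchStart]
  | cons y rs ih =>
    intro n s p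
    obtain ⟨g, gs, h⟩ := splitRunsB_enumFromB_cons rs (n + 1) y
    by_cases hk : y = p + 1
    · have hkey : (p : Int) - n = y - (n + 1) := by omega
      have hrw : splitRunsB (enumFromB n (p :: y :: rs))
          = ((n, p) :: (n + 1, y) :: g) :: gs := by
        rw [show enumFromB n (p :: y :: rs) = (n, p) :: enumFromB (n + 1) (y :: rs) from rfl,
          splitRunsB_cons, h]
        simp [hkey]
      rw [toWindowsLoop, if_pos hk, ← ih (n + 1) s y, h, hrw]
      cases g with
      | nil => simp [groupWinB, patchStart]
      | cons a l =>
        obtain ⟨b, hb⟩ := Option.isSome_iff_exists.mp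
          (List.getLast?_isSome.mpr (List.cons_ne_nil a l))
        simp [groupWinB, patchStart, hb]
    · have hkey : ¬ ((p : Int) - n = y - (n + 1)) := by omega
      have hrw : splitRunsB (enumFromB n (p :: y :: rs))
          = [(n, p)] :: ((n + 1, y) :: g) :: gs := by
        rw [show enumFromB n (p :: y :: rs) = (n, p) :: enumFromB (n + 1) (y :: rs) from rfl,
          splitRunsB_cons, h]
        simp [hkey]
      rw [toWindowsLoop, if_neg hk, ← ih (n + 1) y y, h, hrw]
      simp [groupWinB, patchStart]

theorem patchStart_alt_self (x : Int) (rest : List Int) :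
    patchStart x (to_windows_py_alt (x :: rest)) = to_windows_py_alt (x :: rest) := by
  obtain ⟨g, gs, h⟩ := splitRunsB_enumFromB_cons rest 0 x
  simp [to_windows_py_alt, h, groupWinB, patchStart]

-- ===== VERDICT (by name: the statement is the Claim_ definition above) =====
theorem to_windows_py_spec : Claim_equal_to_windows_py := by
  intro indices _
  unfold Spec_to_windows_py
  cases indices with
  | nil => rfl
  | cons x rest =>
    show toWindowsLoop x x rest = to_windows_py_alt (x :: rest)
    rw [← patch_loop rest 0 x x]
    exact patchStart_alt_self x rest
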